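-- pv_equiv track=rewrite | github.com/Rajasimhareddybolla/CS50_WEB | daily_challenge/common_string.py | max_prodouct
-- ===== SOURCE A (Python) =====
-- def max_prodouct(arr):
--     leng = []
--     for i in range(0,len(arr)):
--         #betwween two adjacent strings
--         for k in range(0,len(arr)):
--             if i != k:
--                 is_consists = False
--                 for ch in arr[i]:
--                     for a_ch in arr[k]:
--                         if ch == a_ch:
--                             is_consists = True
--                             break
--                 if not is_consists:
--                     leng.append(len(arr[i])*len(arr[k]))
--     if leng:
--         return max(leng)
--     else:
--         return 0
-- ===== SOURCE B (Python) =====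
-- def max_prodouct(arr):
--     # One pass: bitmask of character codes per word, grouped in a dict keeping the
--     # max length per distinct mask; then a triangular scan over the (fewer) distinct
--     # masks with an O(1) AND disjointness test and a running maximum.
--     best_len = {}
--     for w in arr:
--         m = 0
--         for ch in w:
--             m |= 1 << ord(ch)
--         best_len[m] = max(best_len.get(m, 0), len(w))
--     items = list(best_len.items())
--     best = 0
--     while items:
--         mi, li = items[0]
--         items = items[1:]
--         for mj, lj in items:
--             if mi & mj == 0:
--                 p = li * lj
--                 if p > best:
--                     best = p
--     return best
-- ===== Notes on version B (the rewrite author's own statement) =====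
-- stated objective: faster
-- what changed: B builds in one pass a dict from per-word character-code bitmask to the max length of a word with that mask, then scans only the unordered pairs of distinct masks with an O(1) AND disjointness test and a running maximum, instead of A's scan over all ordered word pairs that rescans both words' characters for each pair and collects every product in a list before taking max.
import Mathlib
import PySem

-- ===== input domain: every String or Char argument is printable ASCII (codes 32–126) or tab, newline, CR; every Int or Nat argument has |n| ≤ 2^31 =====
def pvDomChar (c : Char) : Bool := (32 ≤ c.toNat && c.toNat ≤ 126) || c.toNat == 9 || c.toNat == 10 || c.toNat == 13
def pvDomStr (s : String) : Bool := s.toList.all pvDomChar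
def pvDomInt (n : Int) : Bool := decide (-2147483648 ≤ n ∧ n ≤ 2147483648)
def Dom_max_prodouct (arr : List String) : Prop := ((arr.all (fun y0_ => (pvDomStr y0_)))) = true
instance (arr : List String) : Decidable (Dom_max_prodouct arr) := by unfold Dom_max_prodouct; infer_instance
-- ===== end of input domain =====

-- B groups the words in one pass into a dict from character-code bitmask to max word length,
-- then scans the unordered pairs of distinct masks with an AND disjointness test and a
-- running maximum (objective: faster).

-- ===== PORT A =====
-- Literal port of A. The inner 'break' after 'is_consists = True' is modeled by the monotone
-- Bool fold (once true it stays true — continuing the scan cannot change the flag): exact.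
def max_prodouct (arr : List String) : Int :=
  let leng : List Int :=
    (PySem.List.pyRange 0 (PySem.List.len arr) 1).foldl (fun leng i =>
      (PySem.List.pyRange 0 (PySem.List.len arr) 1).foldl (fun leng k =>
        if i ≠ k then
          let is_consists : Bool :=
            (PySem.List.pyGetD arr i "").toList.foldl (fun b ch =>
              (PySem.List.pyGetD arr k "").toList.foldl
                (fun b2 a_ch => if ch == a_ch then true else b2) b) false
          if !is_consists then
            leng ++ [PySem.Str.len (PySem.List.pyGetD arr i "") *
                     PySem.Str.len (PySem.List.pyGetD arr k "")]
          else leng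
        else leng) leng) []
  match PySem.List.max? leng (fun x => x) with
  | some m => m
  | none => 0

-- ===== PORT B =====
-- 'while items: (mi, li) = items[0]; items = items[1:]; for mj, lj in items: …'
def pvAltGo : List (Nat × Int) → Int → Int
  | [], best => best
  | (mi, li) :: items, best =>
      pvAltGo items (items.foldl (fun best it =>
        if mi &&& it.1 == 0 then
          if li * it.2 > best then li * it.2 else best
        else best) best)

def max_prodouct_alt (arr : List String) : Int :=
  let best_len : PySem.Dict Nat Int :=
    arr.foldl (fun d w =>
      let m : Nat := w.toList.foldl (fun m ch => m ||| (1 <<< ch.toNat)) 0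
      d.insert m (max (d.getD m 0) (PySem.Str.len w))) PySem.Dict.empty
  pvAltGo best_len.items 0

-- ===== PRECONDITION & SPEC =====
def Spec_max_prodouct (arr : List String) (out : Int) : Prop := out = max_prodouct_alt arr
instance (arr : List String) (out : Int) : Decidable (Spec_max_prodouct arr out) := by unfold Spec_max_prodouct; infer_instance

-- ===== CLAIM (what is proved, stated in full; the proofs are below) =====
def Claim_equal_max_prodouct : Prop := ∀ (arr : List String), Dom_max_prodouct arr → Spec_max_prodouct arr (max_prodouct arr)

-- ===== LEMMAS AND PROOFS =====

-- Two words share a character (A's 'is_consists' predicate, on char lists).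
def pvShared (v w : List Char) : Bool := v.any (fun ch => w.any (fun a => ch == a))

-- A's inner double char loop computes pvShared, starting from flag b.
theorem pvInnerFold (ch : Char) (l : List Char) (b : Bool) :
    l.foldl (fun b2 a_ch => if ch == a_ch then true else b2) b
      = (b || l.any (fun a => ch == a)) := by
  induction l generalizing b with
  | nil => simp
  | cons a t ih =>
      simp only [List.foldl_cons, List.any_cons, ih]
      by_cases h : ch == a <;> simp [h]

theorem pvOuterFold (v w : List Char) (b : Bool) :
    v.foldl (fun b ch => w.foldl (fun b2 a_ch => if ch == a_ch then true else b2) b) b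
      = (b || pvShared v w) := by
  induction v generalizing b with
  | nil => simp [pvShared]
  | cons c t ih =>
      rw [List.foldl_cons, ih, pvInnerFold]
      simp [pvShared, Bool.or_assoc]

-- The list A accumulates, in closed form.
def pvLengA (arr : List String) : List Int :=
  (PySem.List.pyRange 0 (PySem.List.len arr) 1).flatMap (fun i =>
    (PySem.List.pyRange 0 (PySem.List.len arr) 1).flatMap (fun k =>
      if i ≠ k ∧ pvShared (PySem.List.pyGetD arr i "").toList (PySem.List.pyGetD arr k "").toList = false then
        [PySem.Str.len (PySem.List.pyGetD arr i "") * PySem.Str.len (PySem.List.pyGetD arr k "")]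
      else []))

theorem pvFold_eq (arr : List String) :
    ((PySem.List.pyRange 0 (PySem.List.len arr) 1).foldl (fun leng i =>
      (PySem.List.pyRange 0 (PySem.List.len arr) 1).foldl (fun leng k =>
        if i ≠ k then
          let is_consists : Bool :=
            (PySem.List.pyGetD arr i "").toList.foldl (fun b ch =>
              (PySem.List.pyGetD arr k "").toList.foldl
                (fun b2 a_ch => if ch == a_ch then true else b2) b) false
          if !is_consists then
            leng ++ [PySem.Str.len (PySem.List.pyGetD arr i "") *
                     PySem.Str.len (PySem.List.pyGetD arr k "")]
          else leng
        else leng) leng) ([] : List Int)) = pvLengA arr := by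
  unfold pvLengA
  rw [PySem.List.foldl_congr_mem _ _ (fun leng i =>
      leng ++ (PySem.List.pyRange 0 (PySem.List.len arr) 1).flatMap (fun k =>
        if i ≠ k ∧ pvShared (PySem.List.pyGetD arr i "").toList (PySem.List.pyGetD arr k "").toList = false then
          [PySem.Str.len (PySem.List.pyGetD arr i "") * PySem.Str.len (PySem.List.pyGetD arr k "")]
        else []))]
  · exact PySem.List.foldl_append_eq_flatMap _ _ []
  · intro acc i _
    rw [PySem.List.foldl_congr_mem _ _ (fun leng k =>
        leng ++ (if i ≠ k ∧ pvShared (PySem.List.pyGetD arr i "").toList (PySem.List.pyGetD arr k "").toList = false then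
          [PySem.Str.len (PySem.List.pyGetD arr i "") * PySem.Str.len (PySem.List.pyGetD arr k "")]
        else []))]
    · exact PySem.List.foldl_append_eq_flatMap _ _ acc
    · intro acc' k _
      by_cases hik : i = k
      · simp [hik]
      · simp only [ne_eq, hik, not_false_eq_true, if_true, true_and, pvOuterFold, Bool.false_or]
        by_cases hs : pvShared (PySem.List.pyGetD arr i "").toList (PySem.List.pyGetD arr k "").toList
        · simp [hs]
        · simp at hs
          simp [hs]

theorem pvA_eq (arr : List String) :
    max_prodouct arr
      = match PySem.List.max? (pvLengA arr) (fun x => x) with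
        | some m => m
        | none => 0 := by
  unfold max_prodouct
  rw [pvFold_eq]

theorem pvMem_lengA (arr : List String) (x : Int) :
    x ∈ pvLengA arr ↔ ∃ i k : Nat, ∃ hi : i < arr.length, ∃ hk : k < arr.length, i ≠ k ∧
      pvShared arr[i].toList arr[k].toList = false ∧
      x = (arr[i].toList.length : Int) * (arr[k].toList.length : Int) := by
  unfold pvLengA
  simp only [List.mem_flatMap, PySem.List.mem_pyRange_one, PySem.List.len_eq]
  constructor
  · rintro ⟨i, ⟨hi0, hi1⟩, k, ⟨hk0, hk1⟩, hx⟩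
    split at hx
    case isFalse => simp at hx
    case isTrue h =>
      simp only [List.mem_singleton] at hx
      have hi1' : i.toNat < arr.length := by omega
      have hk1' : k.toNat < arr.length := by omega
      refine ⟨i.toNat, k.toNat, hi1', hk1', ?_, ?_, ?_⟩
      · intro he; apply h.1; omega
      · rw [PySem.List.pyGetD_eq_getElem arr "" hi0 hi1,
            PySem.List.pyGetD_eq_getElem arr "" hk0 hk1] at h
        exact h.2
      · rw [PySem.List.pyGetD_eq_getElem arr "" hi0 hi1,
            PySem.List.pyGetD_eq_getElem arr "" hk0 hk1, PySem.Str.len_eq, PySem.Str.len_eq] at hx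
        exact hx
  · rintro ⟨i, k, hi, hk, hne, hsh, hx⟩
    refine ⟨(i : Int), ⟨by omega, by omega⟩, (k : Int), ⟨by omega, by omega⟩, ?_⟩
    have hgi : PySem.List.pyGetD arr (i : Int) "" = arr[i] := by
      rw [PySem.List.pyGetD_eq_getElem arr "" (by omega) (by exact_mod_cast hi)]
      simp
    have hgk : PySem.List.pyGetD arr (k : Int) "" = arr[k] := by
      rw [PySem.List.pyGetD_eq_getElem arr "" (by omega) (by exact_mod_cast hk)]
      simp
    rw [hgi, hgk]
    have : ((i : Int) ≠ (k : Int)) := by exact_mod_cast fun h => hne (by exact_mod_cast h)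
    simp [this, hsh, PySem.Str.len_eq, hx]

-- B-side: the word's bitmask and the grouping dict, as named defs.
def pvMask (w : String) : Nat := w.toList.foldl (fun m ch => m ||| (1 <<< ch.toNat)) 0

def pvBuild (arr : List String) : PySem.Dict Nat Int :=
  arr.foldl (fun d w => d.insert (pvMask w) (max (d.getD (pvMask w) 0) (PySem.Str.len w)))
    PySem.Dict.empty

theorem pvAlt_eq (arr : List String) : max_prodouct_alt arr = pvAltGo (pvBuild arr).items 0 := rfl

-- bit b of the mask ↔ some character with code b
theorem pvMaskFold_testBit (l : List Char) (m : Nat) (b : Nat) :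
    (l.foldl (fun m ch => m ||| (1 <<< ch.toNat)) m).testBit b
      = (m.testBit b || l.any (fun c => c.toNat == b)) := by
  induction l generalizing m with
  | nil => simp
  | cons c t ih =>
      rw [List.foldl_cons, ih]
      have hbit : (m ||| (1 <<< c.toNat)).testBit b = (m.testBit b || (c.toNat == b)) := by
        rw [Nat.testBit_or, Nat.shiftLeft_eq, one_mul, Nat.testBit_two_pow]
        congr 1
      rw [hbit, List.any_cons, Bool.or_assoc]

theorem pvMask_testBit (w : String) (b : Nat) :
    (pvMask w).testBit b = w.toList.any (fun c => c.toNat == b) := by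
  rw [pvMask, pvMaskFold_testBit]; simp

-- shared character ↔ a common set bit
theorem pvShared_iff_bit (v w : String) :
    pvShared v.toList w.toList = true
      ↔ ∃ b, (pvMask v).testBit b = true ∧ (pvMask w).testBit b = true := by
  simp only [pvShared, List.any_eq_true, pvMask_testBit, beq_iff_eq]
  constructor
  · rintro ⟨c, hc, a, ha, rfl⟩
    exact ⟨c.toNat, ⟨c, hc, rfl⟩, ⟨c, ha, rfl⟩⟩
  · rintro ⟨b, ⟨c, hc, hcb⟩, ⟨a, ha, hab⟩⟩
    refine ⟨c, hc, a, ha, ?_⟩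
    exact Char.ext (UInt32.toNat_inj.mp (show c.val.toNat = a.val.toNat by
      rw [show c.val.toNat = c.toNat from rfl, show a.val.toNat = a.toNat from rfl, hcb, hab]))

-- AND-disjointness of masks ↔ no shared character
theorem pvMask_disj (v w : String) :
    (pvMask v &&& pvMask w = 0) ↔ pvShared v.toList w.toList = false := by
  constructor
  · intro h
    by_contra hs
    have hs' : pvShared v.toList w.toList = true := by
      revert hs; cases pvShared v.toList w.toList <;> simp
    obtain ⟨b, hv, hw⟩ := (pvShared_iff_bit v w).mp hs' 
    have := congrArg (fun n => n.testBit b) h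
    simp [Nat.testBit_and, hv, hw, Nat.zero_testBit] at this
  · intro h
    apply Nat.eq_of_testBit_eq
    intro b
    simp only [Nat.testBit_and, Nat.zero_testBit]
    cases hbv : (pvMask v).testBit b with
    | false => simp
    | true =>
        cases hbw : (pvMask w).testBit b with
        | false => simp
        | true => exact absurd ((pvShared_iff_bit v w).mpr ⟨b, hbv, hbw⟩) (by simp [h])

theorem pvMask_zero (w : String) (h : pvMask w = 0) : w.toList = [] := by
  cases hw : w.toList with
  | nil => rfl
  | cons c t =>
      exfalso
      have : (pvMask w).testBit c.toNat = true := by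
        rw [pvMask_testBit, hw]; simp
      rw [h] at this
      simp [Nat.zero_testBit] at this

-- dict invariants ------------------------------------------------------------
theorem pvBuild_nodup (arr : List String) : (pvBuild arr).keys.Nodup := by
  unfold pvBuild
  exact PySem.Dict.nodup_keys_foldl_insert_key arr pvMask
    (fun d w => max (d.getD (pvMask w) 0) (PySem.Str.len w)) PySem.Dict.empty
    PySem.Dict.nodup_keys_empty

theorem pvStrLen_nonneg (w : String) : 0 ≤ PySem.Str.len w := by
  rw [PySem.Str.len_eq]; positivity

-- every item's value is the length of an actual word of arr with that mask
theorem pvItems_src (P : String → Prop) (l : List String) (hl : ∀ w ∈ l, P w)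
    (d : PySem.Dict Nat Int)
    (hd : ∀ p ∈ d.items, ∃ w, P w ∧ pvMask w = p.1 ∧ PySem.Str.len w = p.2) :
    ∀ p ∈ (l.foldl (fun d w => d.insert (pvMask w) (max (d.getD (pvMask w) 0) (PySem.Str.len w))) d).items,
      ∃ w, P w ∧ pvMask w = p.1 ∧ PySem.Str.len w = p.2 := by
  induction l generalizing d with
  | nil => exact hd
  | cons a t ih =>
      rw [List.foldl_cons]
      refine ih (fun w hw => hl w (List.mem_cons_of_mem a hw)) _ ?_
      intro p hp
      rcases (PySem.Dict.mem_items_insert _ _ _ _).mp hp with heq | ⟨hp', _⟩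
      · subst heq
        by_cases hle : d.getD (pvMask a) 0 ≤ PySem.Str.len a
        · exact ⟨a, hl a (List.mem_cons_self), rfl, (max_eq_right hle).symm⟩
        · -- the old max survives; it is some earlier word's length
          have hc : d.contains (pvMask a) = true := by
            by_contra hnc
            have h0 := PySem.Dict.getD_of_not_contains (d := d) (k := pvMask a) (d0 := (0:Int))
              (by revert hnc; cases d.contains (pvMask a) <;> simp)
            have := pvStrLen_nonneg a
            omega
          have hsome : (d.get? (pvMask a)).isSome = true := by
            rw [← PySem.Dict.contains_eq_isSome_get?]; exact hc
          obtain ⟨v, hv⟩ := Option.isSome_iff_exists.mp hsome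
          have hitem := PySem.Dict.mem_items_of_get?_eq_some d hv
          have hval : d.getD (pvMask a) 0 = v := PySem.Dict.getD_of_get?_eq_some d 0 hv
          obtain ⟨w, hPw, hmw, hlw⟩ := hd _ hitem
          refine ⟨w, hPw, hmw, ?_⟩
          simp only [hlw, hval]
          omega
      · exact hd p hp'

-- getD never decreases along the build
theorem pvGetD_mono (l : List String) (d : PySem.Dict Nat Int) (m : Nat) :
    d.getD m 0 ≤ (l.foldl (fun d w => d.insert (pvMask w) (max (d.getD (pvMask w) 0) (PySem.Str.len w))) d).getD m 0 := by
  induction l generalizing d with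
  | nil => exact le_refl _
  | cons a t ih =>
      rw [List.foldl_cons]
      refine le_trans ?_ (ih _)
      rw [PySem.Dict.getD_insert]
      split_ifs with h
      · subst h; omega
      · exact le_refl _

theorem pvBuild_ub_go (l : List String) (d : PySem.Dict Nat Int) (w : String) :
    w ∈ l →
    PySem.Str.len w ≤ (l.foldl (fun d w => d.insert (pvMask w) (max (d.getD (pvMask w) 0) (PySem.Str.len w))) d).getD (pvMask w) 0 := by
  induction l generalizing d with
  | nil => intro hw; cases hw
  | cons a t ih =>
      intro hw
      rw [List.foldl_cons]
      rcases List.mem_cons.mp hw with rfl | hw'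
      · refine le_trans ?_ (pvGetD_mono t _ (pvMask w))
        rw [PySem.Dict.getD_insert_self]; omega
      · exact ih _ hw'

theorem pvBuild_ub (arr : List String) (w : String) (hw : w ∈ arr) :
    PySem.Str.len w ≤ (pvBuild arr).getD (pvMask w) 0 :=
  pvBuild_ub_go arr PySem.Dict.empty w hw

theorem pvBuild_keys (arr : List String) (w : String) (hw : w ∈ arr) :
    pvMask w ∈ (pvBuild arr).keys := by
  unfold pvBuild
  rw [PySem.Dict.keys_foldl_insert_key]
  exact (PySem.Set.mem_update _ _ _).mpr (Or.inr (List.mem_map.mpr ⟨w, hw, rfl⟩))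

-- B-side: the (earlier, later) pairs pvAltGo inspects.
def pvPairs {α : Type} : List α → List (α × α)
  | [] => []
  | x :: rest => rest.map (fun y => (x, y)) ++ pvPairs rest

theorem pvMem_pvPairs {α : Type} (l : List α) (p : α × α) :
    p ∈ pvPairs l ↔ ∃ i k : Nat, ∃ hi : i < l.length, ∃ hk : k < l.length,
      i < k ∧ p = (l[i], l[k]) := by
  induction l with
  | nil => simp [pvPairs]
  | cons a t ih =>
      simp only [pvPairs, List.mem_append, List.mem_map, ih]
      constructor
      · rintro (⟨y, hy, rfl⟩ | ⟨i, k, hi, hk, hik, rfl⟩)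
        · obtain ⟨k, hk, rfl⟩ := List.mem_iff_getElem.mp hy
          exact ⟨0, k + 1, by simp, by simpa using Nat.succ_lt_succ hk, by omega, by simp⟩
        · exact ⟨i + 1, k + 1, by simpa using Nat.succ_lt_succ hi,
            by simpa using Nat.succ_lt_succ hk, by omega, by simp⟩
      · rintro ⟨i, k, hi, hk, hik, rfl⟩
        match i, k with
        | 0, k + 1 =>
            left
            have hk' : k < t.length := by simpa using hk
            exact ⟨t[k], List.getElem_mem _, by simp⟩
        | i + 1, k + 1 =>
            right
            exact ⟨i, k, by simpa using hi, by simpa using hk, by omega, by simp⟩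

theorem pvPairs_of_mem {α : Type} (l : List α) (x y : α) (hx : x ∈ l) (hy : y ∈ l)
    (hxy : x ≠ y) : (x, y) ∈ pvPairs l ∨ (y, x) ∈ pvPairs l := by
  obtain ⟨i, hi, rfl⟩ := List.mem_iff_getElem.mp hx
  obtain ⟨k, hk, rfl⟩ := List.mem_iff_getElem.mp hy
  rcases Nat.lt_trichotomy i k with h | h | h
  · exact Or.inl ((pvMem_pvPairs l _).mpr ⟨i, k, hi, hk, h, rfl⟩)
  · exact absurd (by subst h; rfl) hxy
  · exact Or.inr ((pvMem_pvPairs l _).mpr ⟨k, i, hk, hi, h, rfl⟩)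

-- generic running conditional max
theorem pvCondMax {α : Type} (l : List α) (P : α → Bool) (f : α → Int) (b : Int) :
    b ≤ l.foldl (fun b x => if P x then (if f x > b then f x else b) else b) b ∧
    (l.foldl (fun b x => if P x then (if f x > b then f x else b) else b) b = b ∨
      ∃ x ∈ l, P x = true ∧
        l.foldl (fun b x => if P x then (if f x > b then f x else b) else b) b = f x) ∧
    (∀ x ∈ l, P x = true → f x ≤ l.foldl (fun b x => if P x then (if f x > b then f x else b) else b) b) := by
  induction l generalizing b with
  | nil => simp
  | cons a t ih =>
      simp only [List.foldl_cons, List.mem_cons]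
      set b' := if P a then (if f a > b then f a else b) else b with hb'
      have hbb' : b ≤ b' := by
        rw [hb']; split_ifs <;> omega
      obtain ⟨ih1, ih2, ih3⟩ := ih b'
      refine ⟨le_trans hbb' ih1, ?_, ?_⟩
      · rcases ih2 with h | ⟨x, hx, hPx, hfx⟩
        · rw [h, hb']
          split_ifs with hPa hgt
          · exact Or.inr ⟨a, Or.inl rfl, hPa, rfl⟩
          · exact Or.inl rfl
          · exact Or.inl rfl
        · exact Or.inr ⟨x, Or.inr hx, hPx, hfx⟩
      · rintro x (rfl | hx) hPx
        · refine le_trans ?_ ih1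
          rw [hb']
          split_ifs <;> omega
        · exact ih3 x hx hPx

theorem pvAltGo_eq (items : List (Nat × Int)) (b : Int) :
    pvAltGo items b = (pvPairs items).foldl
      (fun b p => if p.1.1 &&& p.2.1 == 0 then
          (if p.1.2 * p.2.2 > b then p.1.2 * p.2.2 else b) else b) b := by
  induction items generalizing b with
  | nil => rfl
  | cons a t ih =>
      obtain ⟨mi, li⟩ := a
      rw [pvAltGo, ih, pvPairs, List.foldl_append, List.foldl_map]

theorem pvA_nonneg (arr : List String) (x : Int) (hx : x ∈ pvLengA arr) : 0 ≤ x := by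
  obtain ⟨i, k, hi, hk, _, _, rfl⟩ := (pvMem_lengA arr x).mp hx
  positivity

-- a B pair with disjoint masks yields a product A also collects
theorem pvPair_to_A (arr : List String) (p : (Nat × Int) × (Nat × Int))
    (hp : p ∈ pvPairs (pvBuild arr).items) (hd : p.1.1 &&& p.2.1 = 0) :
    p.1.2 * p.2.2 ∈ pvLengA arr := by
  have hnd := pvBuild_nodup arr
  -- distinct positions in items ⇒ distinct keys
  have hne : p.1.1 ≠ p.2.1 := by
    obtain ⟨i, k, hi, hk, hik, hpe⟩ := (pvMem_pvPairs _ p).mp hp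
    have hkeys : (pvBuild arr).keys = (pvBuild arr).items.map (·.1) := rfl
    rw [hkeys] at hnd
    have : ((pvBuild arr).items.map (·.1))[i]'(by simpa using hi)
         ≠ ((pvBuild arr).items.map (·.1))[k]'(by simpa using hk) := by
      intro h
      exact absurd ((List.Nodup.getElem_inj_iff hnd).mp h) (by omega)
    simpa [hpe] using this
  have hsrc := pvItems_src (fun w => w ∈ arr) arr (fun _ h => h) PySem.Dict.empty
    (by intro p hp; simp [PySem.Dict.empty] at hp)
  obtain ⟨v, hv, hmv, hlv⟩ := hsrc p.1 ((pvMem_pvPairs _ p).mp hp |>.elim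
    (fun i h => by obtain ⟨k, hi, hk, _, hpe⟩ := h; rw [hpe]; exact List.getElem_mem _))
  obtain ⟨w, hw, hmw, hlw⟩ := hsrc p.2 ((pvMem_pvPairs _ p).mp hp |>.elim
    (fun i h => by obtain ⟨k, hi, hk, _, hpe⟩ := h; rw [hpe]; exact List.getElem_mem _))
  have hvw : v ≠ w := fun h => hne (by rw [← hmv, ← hmw, h])
  obtain ⟨i0, hi0, hvi⟩ := List.mem_iff_getElem.mp hv
  obtain ⟨k0, hk0, hwk⟩ := List.mem_iff_getElem.mp hw
  have hik : i0 ≠ k0 := fun h => hvw (by rw [← hvi, ← hwk]; subst h; rfl)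
  have hsh : pvShared arr[i0].toList arr[k0].toList = false := by
    rw [hvi, hwk]
    exact (pvMask_disj v w).mp (by rw [hmv, hmw]; exact hd)
  refine (pvMem_lengA arr _).mpr ⟨i0, k0, hi0, hk0, hik, hsh, ?_⟩
  rw [hvi, hwk, ← PySem.Str.len_eq, ← PySem.Str.len_eq, hlv, hlw]

-- every product A collects is bounded by B's running maximum
theorem pvUpper (arr : List String) (x : Int) (hx : x ∈ pvLengA arr) :
    x ≤ max_prodouct_alt arr := by
  rw [pvAlt_eq, pvAltGo_eq]
  obtain ⟨hle, _, hub⟩ := pvCondMax (pvPairs (pvBuild arr).items)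
    (fun p => p.1.1 &&& p.2.1 == 0) (fun p => p.1.2 * p.2.2) 0
  obtain ⟨i, k, hi, hk, hne, hsh, rfl⟩ := (pvMem_lengA arr x).mp hx
  have hm : pvMask arr[i] &&& pvMask arr[k] = 0 := (pvMask_disj _ _).mpr hsh
  by_cases heq : pvMask arr[i] = pvMask arr[k]
  · -- same mask and disjoint ⇒ both words empty ⇒ product 0
    have h0 : pvMask arr[k] = 0 := by rw [heq] at hm; simpa [Nat.and_self] using hm
    have hvi := pvMask_zero arr[i] (heq.trans h0)
    rw [hvi]
    simpa using hle
  · have hnd := pvBuild_nodup arr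
    have hitems := PySem.Dict.items_eq_map_keys (pvBuild arr) hnd (0 : Int)
    have hmemi : (pvMask arr[i], (pvBuild arr).getD (pvMask arr[i]) 0) ∈ (pvBuild arr).items := by
      rw [hitems]; exact List.mem_map.mpr ⟨_, pvBuild_keys arr arr[i] (List.getElem_mem _), rfl⟩
    have hmemk : (pvMask arr[k], (pvBuild arr).getD (pvMask arr[k]) 0) ∈ (pvBuild arr).items := by
      rw [hitems]; exact List.mem_map.mpr ⟨_, pvBuild_keys arr arr[k] (List.getElem_mem _), rfl⟩
    have hgi := pvBuild_ub arr arr[i] (List.getElem_mem _)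
    have hgk := pvBuild_ub arr arr[k] (List.getElem_mem _)
    have h0i : (0:Int) ≤ PySem.Str.len arr[i] := pvStrLen_nonneg _
    have h0k : (0:Int) ≤ PySem.Str.len arr[k] := pvStrLen_nonneg _
    have hprod : (arr[i].toList.length : Int) * (arr[k].toList.length : Int)
        ≤ (pvBuild arr).getD (pvMask arr[i]) 0 * (pvBuild arr).getD (pvMask arr[k]) 0 := by
      rw [← PySem.Str.len_eq, ← PySem.Str.len_eq]
      exact mul_le_mul hgi hgk h0k (by omega)
    have hneq : ((pvMask arr[i], (pvBuild arr).getD (pvMask arr[i]) 0) : Nat × Int)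
        ≠ (pvMask arr[k], (pvBuild arr).getD (pvMask arr[k]) 0) := by
      intro h; exact heq (congrArg Prod.fst h)
    rcases pvPairs_of_mem _ _ _ hmemi hmemk hneq with hpp | hpp
    · refine le_trans hprod (hub _ hpp ?_)
      simpa using hm
    · have hprod' : (arr[i].toList.length : Int) * (arr[k].toList.length : Int)
          ≤ (pvBuild arr).getD (pvMask arr[k]) 0 * (pvBuild arr).getD (pvMask arr[i]) 0 := by
        rw [mul_comm]
        rw [← PySem.Str.len_eq, ← PySem.Str.len_eq]
        exact mul_le_mul hgk hgi h0i (by omega)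
      refine le_trans hprod' (hub _ hpp ?_)
      have hm' : pvMask arr[k] &&& pvMask arr[i] = 0 := by rw [Nat.and_comm]; exact hm
      simpa using hm'

-- ===== VERDICT (by name: the statement is the Claim_ definition above) =====
theorem max_prodouct_spec : Claim_equal_max_prodouct := by
  intro arr _
  unfold Spec_max_prodouct
  rw [pvA_eq]
  have halt : max_prodouct_alt arr = pvAltGo (pvBuild arr).items 0 := pvAlt_eq arr
  obtain ⟨hle, hmem, hub⟩ := pvCondMax (pvPairs (pvBuild arr).items)
    (fun p => p.1.1 &&& p.2.1 == 0) (fun p => p.1.2 * p.2.2) 0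
  rw [← pvAltGo_eq] at hle hmem hub
  cases hmax : PySem.List.max? (pvLengA arr) (fun x => x) with
  | none =>
      have hA0 : pvLengA arr = [] := (PySem.List.max?_eq_none_iff _ _).mp hmax
      show (0 : Int) = _
      rw [halt]
      refine le_antisymm hle ?_
      rcases hmem with h0 | ⟨p, hp, hd, hfp⟩
      · omega
      · exfalso
        have := pvPair_to_A arr p hp (by simpa using hd)
        rw [hA0] at this
        simp at this
  | some m =>
      show m = _
      have hm_mem : m ∈ pvLengA arr := PySem.List.max?_mem hmax
      refine le_antisymm (pvUpper arr m hm_mem) ?_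
      rw [halt]
      rcases hmem with h0 | ⟨p, hp, hd, hfp⟩
      · rw [h0]
        exact pvA_nonneg arr m hm_mem
      · rw [hfp]
        exact PySem.List.max?_isMax hmax _ (pvPair_to_A arr p hp (by simpa using hd))
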